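-- pv_equiv track=rewrite | github.com/michalpokusa/Advent-of-Code | advent_of_code/year_2016/day_04/solution.py | get_room_name_checksum
-- ===== SOURCE A (Python) =====
-- from collections import defaultdict
--
-- def get_room_name_checksum(encrypted_room_name: str) -> str:
--     letters_count = defaultdict(int)
--
--     for letter in encrypted_room_name:
--         if letter != "-":
--             letters_count[letter] += 1
--
--     sorted_letter_counts = sorted(
--         letters_count.items(), key=lambda item: (-item[1], item[0])
--     )
--
--     return "".join(letter for letter, count in sorted_letter_counts)[:5]
-- ===== SOURCE B (Python) =====
-- def occurrences(text, letter):
--     count = 0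
--     for other in text:
--         if other == letter:
--             count += 1
--     return count
--
--
-- def get_room_name_checksum(encrypted_room_name: str) -> str:
--     candidates = []
--     for letter in encrypted_room_name:
--         if letter != "-":
--             if letter not in candidates:
--                 candidates.append(letter)
--
--     checksum = ""
--     while candidates and len(checksum) < 5:
--         best = candidates[0]
--         best_count = occurrences(encrypted_room_name, best)
--         for letter in candidates[1:]:
--             count = occurrences(encrypted_room_name, letter)
--             if count > best_count or (count == best_count and letter < best):
--                 best, best_count = letter, count
--         checksum += best
--         candidates.remove(best)
--     return checksum
-- ===== Notes on version B (the rewrite author's own statement) =====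
-- stated objective: alternative
-- what changed: B builds no frequency map and never sorts: it collects the distinct non-dash letters in one pass, then runs up to five rounds of tournament selection, each round scanning the remaining candidates (recounting occurrences by a plain scan of the string) to pick the letter with the highest count, ties broken alphabetically, and removing it.
import Mathlib
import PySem

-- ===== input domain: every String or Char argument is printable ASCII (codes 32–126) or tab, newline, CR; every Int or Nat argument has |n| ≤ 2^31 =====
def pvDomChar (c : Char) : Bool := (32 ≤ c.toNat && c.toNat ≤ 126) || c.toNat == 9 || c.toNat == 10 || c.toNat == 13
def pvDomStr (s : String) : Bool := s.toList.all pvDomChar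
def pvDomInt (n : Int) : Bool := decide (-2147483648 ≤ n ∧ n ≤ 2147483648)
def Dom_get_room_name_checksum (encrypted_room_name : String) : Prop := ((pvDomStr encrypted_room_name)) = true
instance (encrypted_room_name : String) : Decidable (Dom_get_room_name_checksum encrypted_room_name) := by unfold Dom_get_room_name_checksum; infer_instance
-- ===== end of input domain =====

-- B builds no frequency map and never sorts: it dedups the non-dash letters and then runs up to
-- five rounds of selection (scan candidates, recount by a plain scan of the string, keep the
-- count-max/alphabetically-least letter, remove it) — objective: alternative algorithm, same result.

-- ===== PORT A =====
def get_room_name_checksum (encrypted_room_name : String) : String :=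
  let letters_count : PySem.Dict Char Int :=
    encrypted_room_name.toList.foldl
      (fun d letter => if letter ≠ '-' then d.modify letter 0 (· + 1) else d)
      PySem.Dict.empty
  let sorted_letter_counts :=
    PySem.List.sorted2 letters_count.items (fun item => -item.2) (fun item => item.1)
  String.ofList (PySem.List.slice (sorted_letter_counts.map (fun p => p.1)) none (some 5))

-- ===== PORT B =====
-- occurrences(text, letter): the counting for-loop
def pvOccurrences (text : List Char) (letter : Char) : Int :=
  text.foldl (fun count other => if other == letter then count + 1 else count) 0

-- the body of the 'for letter in candidates[1:]' loop (bb = (best, best_count))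
def pvSelStep (s : List Char) (bb : Char × Int) (letter : Char) : Char × Int :=
  let count := pvOccurrences s letter
  if count > bb.2 ∨ (count = bb.2 ∧ letter < bb.1) then (letter, count) else bb

-- the 'while candidates and len(checksum) < 5' loop
def pvSelLoop (s : List Char) (candidates : List Char) (checksum : List Char) : List Char :=
  match candidates with
  | [] => checksum
  | first :: rest =>
    if checksum.length < 5 then
      -- best = the fold over candidates[1:]; it is ∈ candidates always, so Python's
      -- candidates.remove(best) cannot raise and the [] default of remove? is unreachable
      pvSelLoop s
        ((PySem.List.remove? (first :: rest)
            (rest.foldl (pvSelStep s) (first, pvOccurrences s first)).1).getD [])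
        (checksum ++ [(rest.foldl (pvSelStep s) (first, pvOccurrences s first)).1])
    else checksum
  termination_by 5 - checksum.length
  decreasing_by simp; omega

def get_room_name_checksum_alt (encrypted_room_name : String) : String :=
  let candidates : List Char :=
    encrypted_room_name.toList.foldl
      (fun cand letter =>
        if letter ≠ '-' then (if letter ∉ cand then cand ++ [letter] else cand) else cand)
      []
  String.ofList (pvSelLoop encrypted_room_name.toList candidates [])

-- ===== PRECONDITION & SPEC =====
def Spec_get_room_name_checksum (encrypted_room_name : String) (out : String) : Prop := out = get_room_name_checksum_alt encrypted_room_name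
instance (encrypted_room_name : String) (out : String) : Decidable (Spec_get_room_name_checksum encrypted_room_name out) := by unfold Spec_get_room_name_checksum; infer_instance

-- ===== CLAIM (what is proved, stated in full; the proofs are below) =====
def Claim_equal_get_room_name_checksum : Prop := ∀ (encrypted_room_name : String), Dom_get_room_name_checksum encrypted_room_name → Spec_get_room_name_checksum encrypted_room_name (get_room_name_checksum encrypted_room_name)

-- ===== LEMMAS AND PROOFS =====

-- the key A sorts by, letter counts taken in the FULL string
def pvKey (s : List Char) (c : Char) : Lex (Int × Char) := toLex (-(s.count c : Int), c)

theorem pvKey_injective (s : List Char) : Function.Injective (pvKey s) := by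
  intro a b h
  unfold pvKey at h
  have := congrArg (fun x : Lex (Int × Char) => (ofLex x).2) h
  simpa using this

theorem pvOccurrences_eq (s : List Char) (c : Char) : pvOccurrences s c = (s.count c : Int) := by
  unfold pvOccurrences
  rw [PySem.List.foldl_beq_add_one]
  simp

theorem pvSelStep_lt_iff (s : List Char) (a b : Char) :
    (pvOccurrences s a > pvOccurrences s b ∨
      (pvOccurrences s a = pvOccurrences s b ∧ a < b)) ↔ pvKey s a < pvKey s b := by
  rw [pvOccurrences_eq, pvOccurrences_eq]
  unfold pvKey
  rw [Prod.Lex.lt_iff]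
  constructor
  · rintro (h | ⟨h1, h2⟩)
    · left; simpa using h
    · right; exact ⟨by simpa using h1, h2⟩
  · rintro (h | ⟨h1, h2⟩)
    · left; simp at h; omega
    · right; exact ⟨by simpa using h1, h2⟩

-- the selection fold returns a k-minimum of first :: rest
theorem pv_fold_min (s : List Char) (rest : List Char) : ∀ (b0 : Char),
    (rest.foldl (pvSelStep s) (b0, pvOccurrences s b0)).1 ∈ b0 :: rest ∧
    ∀ x ∈ b0 :: rest, pvKey s (rest.foldl (pvSelStep s) (b0, pvOccurrences s b0)).1 ≤ pvKey s x := by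
  induction rest with
  | nil => intro b0; simp
  | cons c t ih =>
    intro b0
    rw [List.foldl_cons]
    by_cases h : pvOccurrences s c > pvOccurrences s b0 ∨
        (pvOccurrences s c = pvOccurrences s b0 ∧ c < b0)
    · have hstep : pvSelStep s (b0, pvOccurrences s b0) c = (c, pvOccurrences s c) := by
        unfold pvSelStep; simp [h]
      rw [hstep]
      obtain ⟨hm, hmin⟩ := ih c
      refine ⟨by rcases List.mem_cons.mp hm with h' | h' <;> simp [h'], ?_⟩
      intro x hx
      rcases List.mem_cons.mp hx with rfl | hx'
      · have hcb : pvKey s c < pvKey s x := (pvSelStep_lt_iff s c x).mp h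
        exact le_trans (hmin c (by simp)) (le_of_lt hcb)
      · exact hmin x hx'
    · have hstep : pvSelStep s (b0, pvOccurrences s b0) c = (b0, pvOccurrences s b0) := by
        unfold pvSelStep; simp only []; rw [if_neg h]
      rw [hstep]
      obtain ⟨hm, hmin⟩ := ih b0
      have hb0c : pvKey s b0 ≤ pvKey s c := by
        rcases lt_or_ge (pvKey s b0) (pvKey s c) with h' | h'
        · exact le_of_lt h'
        · rcases eq_or_lt_of_le h' with h'' | h''
          · exact le_of_eq h''.symm
          · exact absurd ((pvSelStep_lt_iff s c b0).mpr h'') h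
      refine ⟨by rcases List.mem_cons.mp hm with h' | h' <;> simp [h'], ?_⟩
      intro x hx
      rcases List.mem_cons.mp hx with rfl | hx'
      · exact hmin x (by simp)
      · rcases List.mem_cons.mp hx' with rfl | hx''
        · exact le_trans (hmin b0 (by simp)) hb0c
        · exact hmin x (by simp [hx''])

theorem pv_sorted_pairwise_lt (s : List Char) (cand : List Char) (hnd : cand.Nodup) :
    (PySem.List.sorted cand (pvKey s)).Pairwise (fun a b => pvKey s a < pvKey s b) := by
  have hle := PySem.List.sorted_pairwise cand (pvKey s)
  have hnd' : (PySem.List.sorted cand (pvKey s)).Nodup :=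
    ((PySem.List.sorted_perm cand (pvKey s) false).nodup_iff).mpr hnd
  exact (hle.and hnd').imp (fun hab => lt_of_le_of_ne hab.1 (fun he => hab.2 (pvKey_injective s he)))

-- pulling the k-minimum to the front of the sort
theorem pv_sorted_cons_erase (s : List Char) (cand : List Char) (m : Char)
    (hnd : cand.Nodup) (hm : m ∈ cand) (hmin : ∀ x ∈ cand, pvKey s m ≤ pvKey s x) :
    PySem.List.sorted cand (pvKey s) = m :: PySem.List.sorted (cand.erase m) (pvKey s) := by
  refine PySem.List.sorted_eq_of_perm_of_pairwise_lt cand _ (pvKey s) ?_ ?_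
  · exact ((PySem.List.sorted_perm (cand.erase m) (pvKey s) false).cons m).trans
      (List.perm_cons_erase hm).symm
  · rw [List.pairwise_cons]
    refine ⟨?_, pv_sorted_pairwise_lt s _ (hnd.erase m)⟩
    intro y hy
    have hy' : y ∈ cand.erase m := (PySem.List.mem_sorted _ _ _ _).mp hy
    have hym : y ≠ m := by
      have := (List.Nodup.mem_erase_iff hnd).mp hy'
      exact this.1
    have hyc : y ∈ cand := List.mem_of_mem_erase hy'
    exact lt_of_le_of_ne (hmin y hyc) (fun he => hym (pvKey_injective s he).symm)

theorem pv_removeD_eq_erase {α : Type} [BEq α] [LawfulBEq α] (xs : List α) (v : α) (h : v ∈ xs) :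
    (PySem.List.remove? xs v).getD [] = xs.erase v := by
  unfold PySem.List.remove?
  obtain ⟨i, hi⟩ := Option.isSome_iff_exists.mp (List.isSome_idxOf?.mpr h)
  have hidx : xs.idxOf v = i := by rw [List.idxOf_eq_getD_idxOf?, hi]; rfl
  rw [hi, List.erase_eq_eraseIdx_of_idxOf hidx]
  rfl

-- the selection loop produces the first five letters of the sort by pvKey
theorem pv_loop_eq (s : List Char) : ∀ (n : Nat) (cand : List Char) (acc : List Char),
    cand.length ≤ n → cand.Nodup →
    pvSelLoop s cand acc = acc ++ (PySem.List.sorted cand (pvKey s)).take (5 - acc.length) := by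
  intro n
  induction n with
  | zero =>
    intro cand acc hlen _
    have : cand = [] := List.eq_nil_of_length_eq_zero (Nat.le_zero.mp hlen)
    subst this
    rw [pvSelLoop]
    simp [PySem.List.sorted_eq_nil_iff]
  | succ n ih =>
    intro cand acc hlen hnd
    match cand with
    | [] =>
      rw [pvSelLoop]
      simp [PySem.List.sorted_eq_nil_iff]
    | first :: rest =>
      rw [pvSelLoop]
      by_cases hck : acc.length < 5
      · rw [if_pos hck]
        obtain ⟨hm, hmin⟩ := pv_fold_min s rest first
        set best := (rest.foldl (pvSelStep s) (first, pvOccurrences s first)).1 with hbest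
        rw [pv_removeD_eq_erase _ _ hm]
        rw [ih ((first :: rest).erase best) (acc ++ [best])
          (by have := List.length_erase_of_mem hm; omega)
          (hnd.erase best)]
        rw [pv_sorted_cons_erase s (first :: rest) best hnd hm hmin]
        have h5 : 5 - acc.length = (5 - (acc ++ [best]).length) + 1 := by
          simp; omega
        rw [h5, List.take_succ_cons]
        simp
      · rw [if_neg hck]
        have : 5 - acc.length = 0 := by omega
        simp [this]

-- the deduping first pass builds set(filter(≠ '-', s)) in first-occurrence order
theorem pv_cand_eq (s : List Char) :
    s.foldl
      (fun cand letter =>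
        if letter ≠ '-' then (if letter ∉ cand then cand ++ [letter] else cand) else cand)
      [] = PySem.Set.ofList (s.filter (fun c => decide (c ≠ '-'))) := by
  rw [PySem.List.foldl_ite_eq_foldl_filter]
  rw [PySem.Set.ofList_eq_foldl]
  refine PySem.List.foldl_congr_mem _ _ _ _ ?_
  intro acc x _
  by_cases h : x ∈ acc
  · simp [PySem.Set.add, PySem.Set.contains, h]
  · simp [PySem.Set.add, PySem.Set.contains, h]

-- counts in the filtered string agree with counts in the full string for non-dash letters
theorem pv_count_filter (s : List Char) (c : Char) (hc : c ≠ '-') :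
    (s.filter (fun x => decide (x ≠ '-'))).count c = s.count c := by
  rw [List.count_filter]
  simp [hc]

-- sorted2 with keys k1, k2 is sorted with the lexicographic key toLex (k1 ·, k2 ·)
theorem pv_sorted2_eq_sorted_lex {α : Type} (xs : List α) (k1 : α → Int) (k2 : α → Char) :
    PySem.List.sorted2 xs k1 k2 =
      PySem.List.sorted xs (fun a => (toLex (k1 a, k2 a) : Lex (Int × Char))) := by
  rw [PySem.List.sorted_eq_foldl_insertBy]
  simp only [PySem.List.sorted2, Bool.false_eq_true, if_false]
  have h : (fun a b => decide (k1 a < k1 b) || (!decide (k1 b < k1 a) && decide (k2 a < k2 b)))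
      = (fun a b => decide ((toLex (k1 a, k2 a) : Lex (Int × Char)) < toLex (k1 b, k2 b))) := by
    funext a b
    by_cases h1 : k1 a < k1 b <;> by_cases h2 : k1 b < k1 a <;> by_cases h3 : k2 a < k2 b <;>
      simp [Prod.Lex.lt_iff, h1, h2, h3] <;> omega
  rw [h]

-- A's sorted pair list projects onto the sort of the distinct letters by pvKey
theorem pv_A_letters (s : List Char) :
    (PySem.List.sorted2 (PySem.Dict.counter (s.filter (fun c => decide (c ≠ '-')))).items
        (fun item => -item.2) (fun item => item.1)).map (fun p => p.1)
      = PySem.List.sorted (PySem.Set.ofList (s.filter (fun c => decide (c ≠ '-')))) (pvKey s) := by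
  set cs := s.filter (fun c => decide (c ≠ '-')) with hcs
  set D := PySem.Set.ofList cs with hD
  have hDmem : ∀ c ∈ D, c ≠ '-' := by
    intro c hc
    have : c ∈ cs := (PySem.Set.mem_ofList _ _).mp hc
    have := List.of_mem_filter this
    simpa using this
  have hcount : ∀ c ∈ D, (cs.count c : Int) = (s.count c : Int) := by
    intro c hc
    exact_mod_cast pv_count_filter s c (hDmem c hc)
  rw [PySem.Dict.items_counter, pv_sorted2_eq_sorted_lex]
  have hsorted : PySem.List.sorted (D.map (fun k => (k, (cs.count k : Int))))
      (fun a => (toLex (-a.2, a.1) : Lex (Int × Char)))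
      = (PySem.List.sorted D (pvKey s)).map (fun k => (k, (cs.count k : Int))) := by
    refine PySem.List.sorted_eq_of_perm_of_pairwise_lt _ _ _ ?_ ?_
    · exact (PySem.List.sorted_perm D (pvKey s) false).map _
    · rw [List.pairwise_map]
      have hpw := pv_sorted_pairwise_lt s D (PySem.Set.nodup_ofList cs)
      refine hpw.imp_of_mem ?_
      intro a b ha hb hab
      have ha' : a ∈ D := (PySem.List.mem_sorted _ _ _ _).mp ha
      have hb' : b ∈ D := (PySem.List.mem_sorted _ _ _ _).mp hb
      simp only []
      rw [hcount a ha', hcount b hb']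
      exact hab
  rw [hsorted, List.map_map]
  simp [Function.comp_def]

-- ===== VERDICT (by name: the statement is the Claim_ definition above) =====
theorem get_room_name_checksum_spec : Claim_equal_get_room_name_checksum := by
  intro s _
  unfold Spec_get_room_name_checksum get_room_name_checksum get_room_name_checksum_alt
  simp only []
  set cs := s.toList.filter (fun c => decide (c ≠ '-')) with hcs
  have hA0 : (s.toList.foldl (fun d letter => if letter ≠ '-' then d.modify letter 0 (· + 1) else d)
      PySem.Dict.empty : PySem.Dict Char Int) = PySem.Dict.counter cs := by
    rw [PySem.List.foldl_ite_eq_foldl_filter, PySem.Dict.counter_eq_foldl]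
  rw [hA0, pv_A_letters, pv_cand_eq,
    pv_loop_eq s.toList (PySem.Set.ofList cs).length (PySem.Set.ofList cs) []
      (le_refl _) (PySem.Set.nodup_ofList cs)]
  have hpred : (fun c : Char => !decide (c = '-')) = (fun c : Char => decide (c ≠ '-')) := by
    funext c; simp
  simp [pysem, hpred, hcs]
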